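-- pv_equiv track=rewrite | github.com/guozhiqi14/Fast-Distributed-Sentence-Representation | Utils/TextItem.py | make_skip_task
-- ===== SOURCE A (Python) =====
-- def make_skip_task(paragraph):
--   length  = len(paragraph)
--   if length <= 3:
--     return []
--   else:
--     return [(paragraph[i], paragraph[i-1], paragraph[i+1])
--             for i in range(1, length-1)
--             if paragraph[i].count('?') < 3 and paragraph[i+1].count('?') < 3 and paragraph[i-1].count('?') < 3 and \
--             len(paragraph[i].split()) > 2 and len(paragraph[i+1].split()) > 2 and len(paragraph[i-1].split()) > 2]
-- ===== SOURCE B (Python) =====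
-- def make_skip_task(paragraph):
--   if len(paragraph) <= 3:
--     return []
--   triples = []
--   run = []
--   for s in paragraph:
--     if s.count('?') < 3 and len(s.split()) > 2:
--       run.append(s)
--     else:
--       triples += zip(run[1:], run, run[2:])
--       run = []
--   triples += zip(run[1:], run, run[2:])
--   return triples
-- ===== Notes on version B (the rewrite author's own statement) =====
-- stated objective: alternative
-- what changed: B partitions the paragraph into maximal runs of consecutive valid sentences (one predicate evaluation per sentence) and emits each run's interior triples via zip(run[1:], run, run[2:]), instead of A's index comprehension that re-tests count('?')/split() on all three members of every window.
import Mathlib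
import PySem

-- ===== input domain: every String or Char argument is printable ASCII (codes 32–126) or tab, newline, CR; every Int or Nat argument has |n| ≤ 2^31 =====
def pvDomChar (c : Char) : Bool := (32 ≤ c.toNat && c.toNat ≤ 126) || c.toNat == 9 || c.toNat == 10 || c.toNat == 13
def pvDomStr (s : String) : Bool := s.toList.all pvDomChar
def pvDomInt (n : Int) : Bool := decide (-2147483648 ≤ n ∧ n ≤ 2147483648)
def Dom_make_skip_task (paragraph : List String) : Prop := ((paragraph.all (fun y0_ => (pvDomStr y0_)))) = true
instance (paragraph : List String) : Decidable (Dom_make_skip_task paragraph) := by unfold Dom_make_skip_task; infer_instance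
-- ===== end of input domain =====

-- B partitions the paragraph into maximal runs of consecutive valid sentences and emits
-- each run's interior triples, instead of A's per-index test of all three window members.

-- ===== PORT A =====
-- indices i-1, i, i+1 are always in range for i ∈ range(1, length-1), so the '.getD ""'
-- default of pyGetD is never taken (Python never raises here)
def make_skip_task (paragraph : List String) : List (String × String × String) :=
  let length : Int := paragraph.length
  if length ≤ 3 then []
  else
    (PySem.List.pyRange 1 (length - 1) 1).foldl
      (fun acc i =>
        if decide (PySem.Str.count (PySem.List.pyGetD paragraph i "") "?" < 3)
           && decide (PySem.Str.count (PySem.List.pyGetD paragraph (i + 1) "") "?" < 3)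
           && decide (PySem.Str.count (PySem.List.pyGetD paragraph (i - 1) "") "?" < 3)
           && decide ((PySem.Str.split₀ (PySem.List.pyGetD paragraph i "")).length > 2)
           && decide ((PySem.Str.split₀ (PySem.List.pyGetD paragraph (i + 1) "")).length > 2)
           && decide ((PySem.Str.split₀ (PySem.List.pyGetD paragraph (i - 1) "")).length > 2)
        then acc ++ [(PySem.List.pyGetD paragraph i "",
                      PySem.List.pyGetD paragraph (i - 1) "",
                      PySem.List.pyGetD paragraph (i + 1) "")]
        else acc) []

-- ===== PORT B =====
-- the per-sentence validity test of Source B's loop condition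
def pvPred (s : String) : Bool :=
  decide (PySem.Str.count s "?" < 3) && decide ((PySem.Str.split₀ s).length > 2)

-- Source B's 'zip(run[1:], run, run[2:])': the interior triples of one maximal valid run
def pvInterior (run : List String) : List (String × String × String) :=
  (run.drop 1).zip (run.zip (run.drop 2))

-- Source B's loop: a run-building machine over (triples so far, current run), flushed at the end
def make_skip_task_alt (paragraph : List String) : List (String × String × String) :=
  if (paragraph.length : Int) ≤ 3 then []
  else
    let st := paragraph.foldl
      (fun (acc : List (String × String × String) × List String) s =>
        if pvPred s then (acc.1, acc.2 ++ [s])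
        else (acc.1 ++ pvInterior acc.2, []))
      ([], [])
    st.1 ++ pvInterior st.2

-- ===== PRECONDITION & SPEC =====
def Spec_make_skip_task (paragraph : List String) (out : List (String × String × String)) : Prop := out = make_skip_task_alt paragraph
instance (paragraph : List String) (out : List (String × String × String)) : Decidable (Spec_make_skip_task paragraph out) := by unfold Spec_make_skip_task; infer_instance

-- ===== CLAIM (what is proved, stated in full; the proofs are below) =====
def Claim_equal_make_skip_task : Prop := ∀ (paragraph : List String), Dom_make_skip_task paragraph → Spec_make_skip_task paragraph (make_skip_task paragraph)

-- ===== LEMMAS AND PROOFS =====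

-- A's window condition at index i, and the triple it emits
def pvCondA (p : List String) (i : Int) : Bool :=
  decide (PySem.Str.count (PySem.List.pyGetD p i "") "?" < 3)
  && decide (PySem.Str.count (PySem.List.pyGetD p (i + 1) "") "?" < 3)
  && decide (PySem.Str.count (PySem.List.pyGetD p (i - 1) "") "?" < 3)
  && decide ((PySem.Str.split₀ (PySem.List.pyGetD p i "")).length > 2)
  && decide ((PySem.Str.split₀ (PySem.List.pyGetD p (i + 1) "")).length > 2)
  && decide ((PySem.Str.split₀ (PySem.List.pyGetD p (i - 1) "")).length > 2)

def pvTripleA (p : List String) (i : Int) : String × String × String :=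
  (PySem.List.pyGetD p i "", PySem.List.pyGetD p (i - 1) "", PySem.List.pyGetD p (i + 1) "")

-- proof-side canonical form: the sliding window over the flag table
def pvWindows : List String → List Bool → List (String × String × String)
  | a :: b :: c :: rest, va :: vb :: vc :: vrest =>
      (if va && vb && vc then [(b, a, c)] else []) ++ pvWindows (b :: c :: rest) (vb :: vc :: vrest)
  | _, _ => []

theorem pvBoolShuffle (cb cc ca wb wc wa : Bool) :
    (cb && cc && ca && wb && wc && wa) = ((ca && wa) && (cb && wb) && (cc && wc)) := by
  cases ca <;> cases cb <;> cases cc <;> cases wa <;> cases wb <;> cases wc <;> rfl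

theorem pvCondA_eq (p : List String) (j : Nat) (a b c : String)
    (ha : p[j]? = some a) (hb : p[j+1]? = some b) (hc : p[j+2]? = some c) :
    pvCondA p ((j : Int) + 1) = (pvPred a && pvPred b && pvPred c) := by
  have h1 : ((j : Int) + 1) - 1 = (j : Int) := by ring
  have h2 : ((j : Int) + 1) + 1 = ((j + 2 : Nat) : Int) := by push_cast; ring
  have e0 : PySem.List.pyGetD p ((j : Int) + 1) "" = b := by
    have : ((j : Int) + 1) = ((j + 1 : Nat) : Int) := by push_cast; ring
    rw [this, PySem.List.pyGetD_natCast, List.getD_eq_getElem?_getD, hb]; rfl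
  have e1 : PySem.List.pyGetD p (((j : Int) + 1) - 1) "" = a := by
    rw [h1, PySem.List.pyGetD_natCast, List.getD_eq_getElem?_getD, ha]; rfl
  have e2 : PySem.List.pyGetD p (((j : Int) + 1) + 1) "" = c := by
    rw [h2, PySem.List.pyGetD_natCast, List.getD_eq_getElem?_getD, hc]; rfl
  unfold pvCondA pvPred
  rw [e0, e1, e2, pvBoolShuffle]

theorem pvTripleA_eq (p : List String) (j : Nat) (a b c : String)
    (ha : p[j]? = some a) (hb : p[j+1]? = some b) (hc : p[j+2]? = some c) :
    pvTripleA p ((j : Int) + 1) = (b, a, c) := by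
  unfold pvTripleA
  have h1 : ((j : Int) + 1) - 1 = (j : Int) := by ring
  have h2 : ((j : Int) + 1) + 1 = ((j + 2 : Nat) : Int) := by push_cast; ring
  have hcast : ((j : Int) + 1) = ((j + 1 : Nat) : Int) := by push_cast; ring
  rw [h1, h2, hcast, PySem.List.pyGetD_natCast, PySem.List.pyGetD_natCast,
      PySem.List.pyGetD_natCast, List.getD_eq_getElem?_getD, List.getD_eq_getElem?_getD,
      List.getD_eq_getElem?_getD, ha, hb, hc]
  rfl

-- A's filtered index range equals the window walk over the flag table
theorem pvMain (p : List String) (j : Nat) :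
    pvWindows (p.drop j) ((p.map pvPred).drop j)
      = ((PySem.List.pyRange ((j : Int) + 1) ((p.length : Int) - 1) 1).filter (pvCondA p)).map
          (pvTripleA p) := by
  induction hn : p.length - j generalizing j with
  | zero =>
    have hdrop : p.drop j = [] := List.drop_eq_nil_of_le (by omega)
    have hrange : PySem.List.pyRange ((j : Int) + 1) ((p.length : Int) - 1) 1 = [] :=
      PySem.List.pyRange_one_eq_nil (by omega)
    rw [hdrop, hrange]
    simp [pvWindows]
  | succ n ih =>
    by_cases hbig : 3 ≤ p.length - j
    · have hja : j < p.length := by omega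
      have hjb : j + 1 < p.length := by omega
      have hjc : j + 2 < p.length := by omega
      have ha : p[j]? = some (p[j]'hja) := List.getElem?_eq_getElem hja
      have hb : p[j+1]? = some (p[j+1]'hjb) := List.getElem?_eq_getElem hjb
      have hc : p[j+2]? = some (p[j+2]'hjc) := List.getElem?_eq_getElem hjc
      have hdrop : p.drop j = p[j] :: p[j+1] :: p[j+2] :: p.drop (j+3) := by
        rw [List.drop_eq_getElem_cons hja, List.drop_eq_getElem_cons hjb,
            List.drop_eq_getElem_cons hjc]
      have hdrop1 : p.drop (j+1) = p[j+1] :: p[j+2] :: p.drop (j+3) := by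
        rw [List.drop_eq_getElem_cons hjb, List.drop_eq_getElem_cons hjc]
      have hdropm : ∀ k : Nat, (p.map pvPred).drop k = (p.drop k).map pvPred := by
        intro k; simp [List.map_drop]
      have hrange : PySem.List.pyRange ((j : Int) + 1) ((p.length : Int) - 1) 1
          = ((j : Int) + 1) :: PySem.List.pyRange ((j : Int) + 1 + 1) ((p.length : Int) - 1) 1 :=
        PySem.List.pyRange_one_cons (by omega)
      have ihs := ih (j + 1) (by omega)
      rw [hdropm, hdrop1] at ihs
      rw [hdropm, hdrop, hrange]
      simp only [List.map_cons, pvWindows, List.filter_cons, List.map_cons]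
      rw [pvCondA_eq p j _ _ _ ha hb hc]
      have htrip := pvTripleA_eq p j _ _ _ ha hb hc
      have hcast : ((j : Int) + 1 + 1) = (((j + 1 : Nat) : Int) + 1) := by push_cast; ring
      rw [hcast]
      simp only [List.map_cons] at ihs
      by_cases hv : (pvPred p[j] && pvPred (p[j+1]'hjb) && pvPred (p[j+2]'hjc)) = true
      · simp only [hv, if_true, List.map_cons, htrip, ihs, List.singleton_append]
      · simp only [Bool.not_eq_true] at hv
        simp only [hv, Bool.false_eq_true, if_false, List.nil_append, ihs]
    · have hrange : PySem.List.pyRange ((j : Int) + 1) ((p.length : Int) - 1) 1 = [] :=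
        PySem.List.pyRange_one_eq_nil (by omega)
      rw [hrange]
      have hlen : (p.drop j).length ≤ 2 := by simp; omega
      match hq : p.drop j, hw : (p.map pvPred).drop j with
      | [], _ => simp [pvWindows]
      | [x], _ => simp [pvWindows]
      | [x, y], _ => simp [pvWindows]
      | x :: y :: z :: t, _ =>
        rw [hq] at hlen; simp at hlen

-- pvInterior peels one triple off a run of length ≥ 3
theorem pvInterior_cons (a b c : String) (t : List String) :
    pvInterior (a :: b :: c :: t) = (b, a, c) :: pvInterior (b :: c :: t) := by
  simp [pvInterior, List.zip]

-- on an all-valid run the window walk is exactly the interior triples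
theorem pvWinValid : ∀ (run : List String), (∀ x ∈ run, pvPred x = true) →
    pvWindows run (run.map pvPred) = pvInterior run
  | [], _ => by simp [pvWindows, pvInterior]
  | [a], _ => by simp [pvWindows, pvInterior]
  | [a, b], _ => by simp [pvWindows, pvInterior]
  | a :: b :: c :: t, h => by
    have ha := h a (by simp)
    have hb := h b (by simp)
    have hc := h c (by simp)
    have ih := pvWinValid (b :: c :: t) (by intro x hx; exact h x (by simp at hx ⊢; tauto))
    simp only [List.map_cons, pvWindows, ha, hb, hc, Bool.and_self, if_true,
      pvInterior_cons]
    simp only [List.map_cons] at ih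
    rw [hb, hc] at ih
    rw [ih]
    rfl

-- an invalid head contributes no window
theorem pvWinConsFalse (s : String) (hs : pvPred s = false) : ∀ (l : List String),
    pvWindows (s :: l) ((s :: l).map pvPred) = pvWindows l (l.map pvPred)
  | [] => by simp [pvWindows]
  | [a] => by simp [pvWindows]
  | a :: b :: t => by
    simp [pvWindows, hs]

-- flushing: windows of (valid run ++ invalid sentence ++ rest) = interior of run ++ windows of rest
theorem pvWinFlush : ∀ (run : List String), (∀ x ∈ run, pvPred x = true) →
    ∀ (s : String), pvPred s = false → ∀ (rest : List String),
    pvWindows (run ++ s :: rest) ((run ++ s :: rest).map pvPred)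
      = pvInterior run ++ pvWindows rest (rest.map pvPred)
  | [], _, s, hs, rest => by
    simpa [pvInterior] using pvWinConsFalse s hs rest
  | [a], h, s, hs, rest => by
    have h1 := pvWinConsFalse s hs rest
    cases rest with
    | nil => simp [pvWindows, pvInterior]
    | cons r t =>
      simp only [List.map_cons] at h1
      rw [hs] at h1
      simp only [List.cons_append, List.nil_append, List.map_cons, pvWindows, hs,
        Bool.and_false, Bool.false_and, Bool.false_eq_true, if_false, List.nil_append]
      simpa [pvInterior] using h1
  | [a, b], h, s, hs, rest => by
    have h1 := pvWinFlush [b] (by intro x hx; exact h x (by simp at hx ⊢; tauto)) s hs rest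
    simp only [List.cons_append, List.nil_append, List.map_cons, pvWindows, hs,
      Bool.and_false, Bool.false_eq_true, if_false, List.nil_append] at h1 ⊢
    simpa [pvInterior] using h1
  | a :: b :: c :: t, h, s, hs, rest => by
    have ha := h a (by simp)
    have hb := h b (by simp)
    have hc := h c (by simp)
    have ih := pvWinFlush (b :: c :: t) (by intro x hx; exact h x (by simp at hx ⊢; tauto)) s hs rest
    simp only [List.cons_append, List.map_cons, pvWindows, ha, hb, hc, Bool.and_self,
      if_true, pvInterior_cons] at ih ⊢
    rw [ih]
    simp

-- the run machine of B computes the window walk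
theorem pvFoldRun : ∀ (rest : List String) (out : List (String × String × String))
    (run : List String), (∀ x ∈ run, pvPred x = true) →
    (let st := rest.foldl
        (fun (acc : List (String × String × String) × List String) s =>
          if pvPred s then (acc.1, acc.2 ++ [s])
          else (acc.1 ++ pvInterior acc.2, [])) (out, run)
     st.1 ++ pvInterior st.2)
      = out ++ pvWindows (run ++ rest) ((run ++ rest).map pvPred)
  | [], out, run, h => by
    simp only [List.foldl_nil, List.append_nil]
    rw [pvWinValid run h]
  | s :: rest, out, run, h => by
    simp only [List.foldl_cons]
    by_cases hs : pvPred s = true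
    · rw [hs]
      have ih := pvFoldRun rest out (run ++ [s]) (by
        intro x hx; rcases List.mem_append.1 hx with hx | hx
        · exact h x hx
        · simp at hx; subst hx; exact hs)
      simp only [if_true] at ih ⊢
      rw [ih, List.append_assoc]
      simp
    · simp only [Bool.not_eq_true] at hs
      rw [hs]
      have ih := pvFoldRun rest (out ++ pvInterior run) [] (by intro x hx; simp at hx)
      simp only [Bool.false_eq_true, if_false] at ih ⊢
      rw [ih, List.nil_append, List.append_assoc, ← pvWinFlush run h s hs rest]

-- ===== VERDICT (by name: the statement is the Claim_ definition above) =====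
theorem make_skip_task_spec : Claim_equal_make_skip_task := by
  intro p _
  unfold Spec_make_skip_task make_skip_task make_skip_task_alt
  by_cases h : (p.length : Int) ≤ 3
  · simp [h]
  · simp only [h, if_false]
    have hA := PySem.List.foldl_append_if (pvCondA p) (pvTripleA p)
      (PySem.List.pyRange 1 ((p.length : Int) - 1) 1) []
    have hM := pvMain p 0
    simp only [Nat.cast_zero, List.drop_zero, zero_add] at hM
    have hB := pvFoldRun p [] [] (by intro x hx; simp at hx)
    simp only [List.nil_append] at hB hM
    simp only [pvCondA, pvTripleA] at hA
    rw [hB, hM, List.nil_append] at *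
    exact hA
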